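-- pv_equiv track=rewrite | github.com/basti-shi031/CommitClawerSever | util/UrlUtils.py | genCommitHashAndProjectName
-- ===== SOURCE A (Python) =====
-- def genCommitHashAndProjectName(url):
--     # 找不为空的最后一个字段是commit_id
--     # 最后第三个不会空的id是project_name
--     keys = url.split('/')
--     keySize = len(keys)
--     commit_hash = ''
--     project_name = ''
--     owner = ''
--     # 不为空的字段数量
--     validKey = 0
--     for i in range(0, keySize)[::-1]:
--         if keys[i] != '':
--             validKey += 1
--             if validKey == 1:
--                 commit_hash = keys[i]
--             elif validKey == 3:
--                 project_name = keys[i]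
--                 break
--     return commit_hash, project_name
-- ===== SOURCE B (Python) =====
-- def genCommitHashAndProjectName(url):
--     # Build the non-empty segments once, then select by position.
--     valid = [k for k in url.split('/') if k != '']
--     commit_hash = valid[-1] if valid else ''
--     project_name = valid[-3] if len(valid) >= 3 else ''
--     return commit_hash, project_name
-- ===== Notes on version B (the rewrite author's own statement) =====
-- stated objective: idiomatic
-- what changed: Replaces A's fused counter-driven reverse index scan (with break) by one filtering pass over the split segments followed by constant-time negative indexing (valid[-1], valid[-3]).
import Mathlib
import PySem

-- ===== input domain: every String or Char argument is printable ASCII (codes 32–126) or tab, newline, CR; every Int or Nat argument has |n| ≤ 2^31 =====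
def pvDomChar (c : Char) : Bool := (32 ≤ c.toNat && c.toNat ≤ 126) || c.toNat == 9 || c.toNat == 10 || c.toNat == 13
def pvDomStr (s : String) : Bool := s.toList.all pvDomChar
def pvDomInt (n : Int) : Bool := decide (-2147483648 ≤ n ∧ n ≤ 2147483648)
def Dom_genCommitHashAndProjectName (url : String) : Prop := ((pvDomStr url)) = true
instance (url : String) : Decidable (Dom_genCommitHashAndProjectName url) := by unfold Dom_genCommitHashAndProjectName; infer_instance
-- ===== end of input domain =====

-- B replaces A's counter-driven reverse scan with one filtering pass plus negative indexing (idiomatic; same cost).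

-- ===== PORT A =====
-- the reverse index loop of A, with `validKey` counter and the `break` at validKey == 3
def genLoopA (keys : List String) : List Int → String → String → Int → String × String
  | [], commit_hash, project_name, _ => (commit_hash, project_name)
  | i :: rest, commit_hash, project_name, validKey =>
      if PySem.List.pyGetD keys i "" != "" then
        if validKey + 1 = 1 then
          genLoopA keys rest (PySem.List.pyGetD keys i "") project_name (validKey + 1)
        else if validKey + 1 = 3 then
          (commit_hash, PySem.List.pyGetD keys i "")   -- break
        else genLoopA keys rest commit_hash project_name (validKey + 1)
      else genLoopA keys rest commit_hash project_name validKey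

def genCommitHashAndProjectName (url : String) : String × String :=
  let keys := (PySem.Str.split? url "/").getD []      -- '/' ≠ '', so split? is some
  let keySize : Int := keys.length
  genLoopA keys ((PySem.List.slice? (PySem.List.pyRange 0 keySize 1) none none (-1)).getD []) "" "" 0

-- ===== PORT B =====
def genCommitHashAndProjectName_alt (url : String) : String × String :=
  let valid := ((PySem.Str.split? url "/").getD []).filter (fun k => k != "")
  let commit_hash := if valid ≠ [] then PySem.List.pyGetD valid (-1) "" else ""
  let project_name := if 3 ≤ (valid.length : Int) then PySem.List.pyGetD valid (-3) "" else ""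
  (commit_hash, project_name)

-- ===== PRECONDITION & SPEC =====
def Spec_genCommitHashAndProjectName (url : String) (out : String × String) : Prop := out = genCommitHashAndProjectName_alt url
instance (url : String) (out : String × String) : Decidable (Spec_genCommitHashAndProjectName url out) := by unfold Spec_genCommitHashAndProjectName; infer_instance

-- ===== CLAIM (what is proved, stated in full; the proofs are below) =====
def Claim_equal_genCommitHashAndProjectName : Prop := ∀ (url : String), Dom_genCommitHashAndProjectName url → Spec_genCommitHashAndProjectName url (genCommitHashAndProjectName url)

-- ===== LEMMAS AND PROOFS =====

-- proof-side restatement of A's loop directly on the list of visited elements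
def scanA : List String → String → String → Int → String × String
  | [], ch, pn, _ => (ch, pn)
  | k :: rest, ch, pn, v =>
      if k != "" then
        if v + 1 = 1 then scanA rest k pn (v + 1)
        else if v + 1 = 3 then (ch, k)
        else scanA rest ch pn (v + 1)
      else scanA rest ch pn v

theorem genLoopA_eq_scanA (keys : List String) (is : List Int) (ch pn : String) (v : Int) :
    genLoopA keys is ch pn v = scanA (is.map (fun i => PySem.List.pyGetD keys i "")) ch pn v := by
  induction is generalizing ch pn v with
  | nil => rfl
  | cons i rest ih => simp only [genLoopA, scanA, List.map]; split_ifs <;> simp [ih]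

theorem scanA_two (rs : List String) (ch : String) :
    scanA rs ch "" 2 = (ch, ((rs.filter (fun k => k != ""))[0]?).getD "") := by
  induction rs with
  | nil => rfl
  | cons k rest ih =>
    by_cases h : k = "" <;> simp [scanA, h, ih]

theorem scanA_one (rs : List String) (ch : String) :
    scanA rs ch "" 1 = (ch, ((rs.filter (fun k => k != ""))[1]?).getD "") := by
  induction rs with
  | nil => rfl
  | cons k rest ih =>
    by_cases h : k = "" <;> simp [scanA, h, ih, scanA_two]

theorem scanA_zero (rs : List String) :
    scanA rs "" "" 0 = (((rs.filter (fun k => k != ""))[0]?).getD "",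
                        ((rs.filter (fun k => k != ""))[2]?).getD "") := by
  induction rs with
  | nil => rfl
  | cons k rest ih =>
    by_cases h : k = "" <;> simp [scanA, h, ih, scanA_one]

-- reading a list back-to-front equals Python's negative indexing
theorem rev_getD (xs : List String) (k : Nat) (hk : k < xs.length) :
    (xs.reverse[k]?).getD "" = PySem.List.pyGetD xs (-((k : Int) + 1)) "" := by
  have h1 : ¬((0 : Int) ≤ -((k : Int) + 1)) := by omega
  have h2 : -((xs.length : Int)) ≤ -((k : Int) + 1) := by omega
  have h3 : (-(-((k : Int) + 1))).toNat = k + 1 := by omega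
  rw [List.getElem?_reverse hk]
  simp only [PySem.List.pyGetD, PySem.List.pyGet?, PySem.List.pyIdx?, if_neg h1, if_pos h2, h3]
  have h4 : xs.length - 1 - k = xs.length - (k + 1) := by omega
  rw [h4]
  rfl

theorem main_lemma (keys : List String) :
    scanA keys.reverse "" "" 0 =
      (let valid := keys.filter (fun k => k != "")
       ((if valid ≠ [] then PySem.List.pyGetD valid (-1) "" else ""),
        (if 3 ≤ (valid.length : Int) then PySem.List.pyGetD valid (-3) "" else ""))) := by
  rw [scanA_zero]
  simp only [List.filter_reverse]
  set valid := keys.filter (fun k => k != "") with hv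
  rw [Prod.mk.injEq]
  constructor
  · by_cases h : valid = []
    · simp [h]
    · have hk : 0 < valid.length := List.length_pos_iff.mpr h
      rw [if_pos h]
      have h0 := rev_getD valid 0 hk
      norm_num at h0
      exact h0
  · by_cases h : 3 ≤ (valid.length : Int)
    · have hk : 2 < valid.length := by exact_mod_cast (by omega : (2 : Int) < valid.length)
      rw [if_pos h]
      have h2 := rev_getD valid 2 hk
      norm_num at h2
      exact h2
    · have hk : valid.reverse.length ≤ 2 := by rw [List.length_reverse]; omega
      simp [h, List.getElem?_eq_none hk]

-- ===== VERDICT (by name: the statement is the Claim_ definition above) =====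
theorem genCommitHashAndProjectName_spec : Claim_equal_genCommitHashAndProjectName := by
  intro url _
  unfold Spec_genCommitHashAndProjectName genCommitHashAndProjectName genCommitHashAndProjectName_alt
  simp only [PySem.List.slice?_none_none_neg_one, Option.getD_some]
  rw [genLoopA_eq_scanA, List.map_reverse, PySem.List.map_pyGetD_pyRange_zero']
  rw [main_lemma]
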